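-- pv_equiv track=rewrite | github.com/BjerknesClimateDataCentre/xover | d2qc/d2qc/data/forms/merge.py | in_data_type_names
-- ===== SOURCE A (Python) =====
-- def in_data_type_names(primary:int,secondary:int,data_type_names:list=[]):
--     """
--     return true if primary and secondary are found both found in
--     data_type_names id. data_type_names is an array of dicts with an
--     id property: data_type_names=[{'id':1},{'id':2},...]
--     """
--     p = 0
--     s = 0
--     for d in data_type_names:
--         if int(d['id']) == int(primary):
--             p = 1
--         if int(d['id']) == int(secondary):
--             s = 1
--     return s + p == 2
-- ===== SOURCE B (Python) =====
-- def in_data_type_names(primary: int, secondary: int, data_type_names: list = []):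
--     return (any(int(d['id']) == int(primary) for d in data_type_names)
--             and any(int(d['id']) == int(secondary) for d in data_type_names))
-- ===== Notes on version B (the rewrite author's own statement) =====
-- stated objective: idiomatic
-- what changed: Replaces the single fused loop that maintains two integer flags (summed and compared to 2 at the end) with two independent short-circuiting any() membership scans combined by 'and'.
import Mathlib
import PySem

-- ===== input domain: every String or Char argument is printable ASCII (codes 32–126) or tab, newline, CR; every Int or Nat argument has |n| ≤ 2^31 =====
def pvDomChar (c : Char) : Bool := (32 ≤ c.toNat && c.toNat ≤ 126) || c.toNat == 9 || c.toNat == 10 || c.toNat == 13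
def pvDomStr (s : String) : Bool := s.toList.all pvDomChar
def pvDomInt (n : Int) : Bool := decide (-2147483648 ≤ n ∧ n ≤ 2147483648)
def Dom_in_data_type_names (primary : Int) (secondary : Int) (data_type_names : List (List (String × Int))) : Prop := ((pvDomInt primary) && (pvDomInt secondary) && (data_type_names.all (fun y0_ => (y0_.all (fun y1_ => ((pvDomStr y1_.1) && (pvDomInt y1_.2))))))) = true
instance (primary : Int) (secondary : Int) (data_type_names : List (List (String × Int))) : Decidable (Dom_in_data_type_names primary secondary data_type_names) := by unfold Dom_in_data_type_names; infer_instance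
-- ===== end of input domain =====

-- B replaces A's fused two-flag loop with two independent short-circuiting membership scans ('any' and 'any'); equivalence is proved on inputs where every dict has an 'id' key (A raises KeyError otherwise).

-- ===== PORT A =====
-- d['id'] with the key present (Pre_ guarantees it); int() on an int is the identity.
def in_data_type_names (primary : Int) (secondary : Int) (data_type_names : List (List (String × Int))) : Bool :=
  let st := data_type_names.foldl (fun (ps : Int × Int) d =>
    let v := PySem.Dict.getD (PySem.Dict.mk d) "id" 0
    let p := if v == primary then (1 : Int) else ps.1
    let s := if v == secondary then (1 : Int) else ps.2
    (p, s)) (0, 0)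
  st.2 + st.1 == 2

-- ===== PORT B =====
def in_data_type_names_alt (primary : Int) (secondary : Int) (data_type_names : List (List (String × Int))) : Bool :=
  data_type_names.any (fun d => PySem.Dict.getD (PySem.Dict.mk d) "id" 0 == primary)
    && data_type_names.any (fun d => PySem.Dict.getD (PySem.Dict.mk d) "id" 0 == secondary)

-- ===== PRECONDITION & SPEC =====
-- Pre_ excludes exactly the inputs where some dict lacks the key 'id', on which A raises KeyError.
def Pre_in_data_type_names (primary : Int) (secondary : Int) (data_type_names : List (List (String × Int))) : Prop :=
  ∀ d ∈ data_type_names, (PySem.Dict.get? (PySem.Dict.mk d) "id").isSome = true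
instance (primary : Int) (secondary : Int) (data_type_names : List (List (String × Int))) : Decidable (Pre_in_data_type_names primary secondary data_type_names) := by unfold Pre_in_data_type_names; infer_instance
def pvWitness_in_data_type_names : Int × Int × (List (List (String × Int))) := (1, 2, [[("id", 1)], [("id", 2)]])

def Spec_in_data_type_names (primary : Int) (secondary : Int) (data_type_names : List (List (String × Int))) (out : Bool) : Prop := out = in_data_type_names_alt primary secondary data_type_names
instance (primary : Int) (secondary : Int) (data_type_names : List (List (String × Int))) (out : Bool) : Decidable (Spec_in_data_type_names primary secondary data_type_names out) := by unfold Spec_in_data_type_names; infer_instance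

-- ===== CLAIM (what is proved, stated in full; the proofs are below) =====
def Claim_equal_in_data_type_names : Prop := ∀ (primary : Int) (secondary : Int) (data_type_names : List (List (String × Int))), Dom_in_data_type_names primary secondary data_type_names → Pre_in_data_type_names primary secondary data_type_names → Spec_in_data_type_names primary secondary data_type_names (in_data_type_names primary secondary data_type_names)

-- ===== LEMMAS AND PROOFS =====

-- Characterisation of A's fold: each flag ends at 1 iff some element matches, else keeps its start value.
theorem pv_foldl_flags (primary secondary : Int) :
    ∀ (l : List (List (String × Int))) (p0 s0 : Int),
      l.foldl (fun (ps : Int × Int) d =>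
        let v := PySem.Dict.getD (PySem.Dict.mk d) "id" 0
        let p := if v == primary then (1 : Int) else ps.1
        let s := if v == secondary then (1 : Int) else ps.2
        (p, s)) (p0, s0)
      = ((if l.any (fun d => PySem.Dict.getD (PySem.Dict.mk d) "id" 0 == primary) then 1 else p0),
         (if l.any (fun d => PySem.Dict.getD (PySem.Dict.mk d) "id" 0 == secondary) then 1 else s0)) := by
  intro l
  induction l with
  | nil => intro p0 s0; simp
  | cons d t ih =>
    intro p0 s0
    simp only [List.foldl_cons, List.any_cons, ih]
    by_cases hp : PySem.Dict.getD (PySem.Dict.mk d) "id" 0 == primary <;>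
      by_cases hs : PySem.Dict.getD (PySem.Dict.mk d) "id" 0 == secondary <;>
      simp [hp, hs]

-- ===== VERDICT (by name: the statement is the Claim_ definition above) =====
theorem in_data_type_names_spec : Claim_equal_in_data_type_names := by
  intro primary secondary l _ _
  unfold Spec_in_data_type_names in_data_type_names in_data_type_names_alt
  rw [pv_foldl_flags]
  by_cases hp : l.any (fun d => PySem.Dict.getD (PySem.Dict.mk d) "id" 0 == primary) <;>
    by_cases hs : l.any (fun d => PySem.Dict.getD (PySem.Dict.mk d) "id" 0 == secondary) <;>
    simp [hp, hs]
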